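-- pv_equiv track=rewrite | github.com/meshalmuskan/cipher-tool | cipher_cli.py | combined_keyless_keyed_transposition_cipher
-- ===== SOURCE A (Python) =====
-- def combined_keyless_keyed_transposition_cipher(text, key):
--     """
--     Encrypts text using a combination of Keyless and Keyed Transposition.
--     First rearranges the text using Keyless Transposition, then applies Keyed Transposition.
--     Validates key.
--     """
--     if not key or len(set(key)) != len(key):
--         raise ValueError("Key must be a non-empty string of unique characters.")
--
--     # Keyless Transposition: Rearrange text by swapping halves
--     mid = len(text) // 2
--     keyless_transposed_text = text[mid:] + text[:mid]
--
--     # Keyed Transposition: Rearranging using the key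
--     key_length = len(key)
--     key_order = sorted(range(key_length), key=lambda k: key[k])
--
--     grid = [''] * key_length
--     index = 0
--
--     for char in keyless_transposed_text:
--         grid[index % key_length] += char
--         index += 1
--
--     # Rearranging the grid based on the key order
--     encrypted_text = ''.join(grid[i] for i in key_order)
--     return encrypted_text
-- ===== SOURCE B (Python) =====
-- def combined_keyless_keyed_transposition_cipher(text, key):
--     if not key or len(set(key)) != len(key):
--         raise ValueError("Key must be a non-empty string of unique characters.")
--
--     mid = len(text) // 2
--     keyless = text[mid:] + text[:mid]
--
--     k = len(key)
--     order = sorted(range(k), key=lambda i: key[i])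
--
--     # Gather each column directly with a stride-k walk (instead of
--     # scattering every character round-robin into k growing buckets).
--     pieces = []
--     for i in order:
--         col = []
--         j = i
--         while j < len(keyless):
--             col.append(keyless[j])
--             j += k
--         pieces.append(''.join(col))
--     return ''.join(pieces)
-- ===== Notes on version B (the rewrite author's own statement) =====
-- stated objective: alternative
-- what changed: Replaces the round-robin scatter loop (appending each character to grid[index % key_length]) with a direct per-column gather: for each key position, a stride-k walk collects exactly that column's characters, already in key order.
import Mathlib
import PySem

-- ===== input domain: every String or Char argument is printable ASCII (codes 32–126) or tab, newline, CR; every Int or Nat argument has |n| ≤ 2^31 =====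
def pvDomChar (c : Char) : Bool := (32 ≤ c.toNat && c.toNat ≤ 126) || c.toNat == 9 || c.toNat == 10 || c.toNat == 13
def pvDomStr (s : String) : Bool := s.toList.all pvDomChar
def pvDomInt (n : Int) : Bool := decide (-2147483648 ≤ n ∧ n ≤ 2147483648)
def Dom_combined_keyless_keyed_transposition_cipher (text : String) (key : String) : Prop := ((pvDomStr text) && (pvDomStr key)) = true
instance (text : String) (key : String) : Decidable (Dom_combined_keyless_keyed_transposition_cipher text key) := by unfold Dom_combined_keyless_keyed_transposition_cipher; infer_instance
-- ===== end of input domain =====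

-- B gathers each column with a stride-k walk instead of A's round-robin scatter into k buckets (objective: alternative, same cost).

-- ===== PORT A =====
-- literal port of A; where Python raises ValueError (empty or repeated key) the port
-- returns "" — exactly those inputs are excluded by Pre_ below.
def combined_keyless_keyed_transposition_cipher (text : String) (key : String) : String :=
  let kchars := key.toList
  -- if not key or len(set(key)) != len(key): raise ValueError(...)
  if kchars.isEmpty || PySem.Set.len (PySem.Set.ofList kchars) ≠ kchars.length then ""
  else
    let t := text.toList
    let mid := t.length / 2                       -- len(text) // 2 (nonnegative, so Nat division is exact)
    let keyless := t.drop mid ++ t.take mid       -- text[mid:] + text[:mid]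
    let kl := kchars.length
    -- key_order = sorted(range(key_length), key=lambda k: key[k]); every index is in range, so key[k] = getD
    let key_order := PySem.List.sorted (List.range kl) (fun i => kchars.getD i ' ') false
    -- grid scatter loop: grid[index % key_length] += char; index += 1
    let grid := (keyless.foldl
      (fun (st : List (List Char) × Nat) c => (st.1.modify (st.2 % kl) (· ++ [c]), st.2 + 1))
      (List.replicate kl ([] : List Char), 0)).1
    -- ''.join(grid[i] for i in key_order)
    String.ofList (key_order.map (fun i => grid.getD i [])).flatten

-- ===== PORT B =====
-- the stride-k while loop of Source B: col keyless i k = [keyless[i], keyless[i+k], …]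
def pvCol (s : List Char) (i k : Nat) : List Char :=
  if h : i < s.length ∧ 0 < k then s[i]'h.1 :: pvCol s (i + k) k else []
termination_by s.length - i
decreasing_by omega

def combined_keyless_keyed_transposition_cipher_alt (text : String) (key : String) : String :=
  let kchars := key.toList
  if kchars.isEmpty || PySem.Set.len (PySem.Set.ofList kchars) ≠ kchars.length then ""
  else
    let t := text.toList
    let mid := t.length / 2
    let keyless := t.drop mid ++ t.take mid
    let kl := kchars.length
    let order := PySem.List.sorted (List.range kl) (fun i => kchars.getD i ' ') false
    String.ofList (order.flatMap (fun i => pvCol keyless i kl))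

-- ===== PRECONDITION & SPEC =====
-- Pre_ excludes exactly the inputs on which A raises ValueError: empty key or repeated key characters.
def Pre_combined_keyless_keyed_transposition_cipher (text : String) (key : String) : Prop :=
  key.toList ≠ [] ∧ key.toList.Nodup
instance (text : String) (key : String) : Decidable (Pre_combined_keyless_keyed_transposition_cipher text key) := by unfold Pre_combined_keyless_keyed_transposition_cipher; infer_instance

def pvWitness_combined_keyless_keyed_transposition_cipher : String × String := ("hello world", "key")

def Spec_combined_keyless_keyed_transposition_cipher (text : String) (key : String) (out : String) : Prop := out = combined_keyless_keyed_transposition_cipher_alt text key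
instance (text : String) (key : String) (out : String) : Decidable (Spec_combined_keyless_keyed_transposition_cipher text key out) := by unfold Spec_combined_keyless_keyed_transposition_cipher; infer_instance

-- ===== CLAIM (what is proved, stated in full; the proofs are below) =====
def Claim_equal_combined_keyless_keyed_transposition_cipher : Prop := ∀ (text : String) (key : String), Dom_combined_keyless_keyed_transposition_cipher text key → Pre_combined_keyless_keyed_transposition_cipher text key → Spec_combined_keyless_keyed_transposition_cipher text key (combined_keyless_keyed_transposition_cipher text key)

-- ===== LEMMAS AND PROOFS =====

-- A's scatter step
def pvStep (k : Nat) (st : List (List Char) × Nat) (c : Char) : List (List Char) × Nat :=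
  (st.1.modify (st.2 % k) (· ++ [c]), st.2 + 1)

lemma pvCol_of_ge (s : List Char) (i k : Nat) (h : s.length ≤ i) : pvCol s i k = [] := by
  rw [pvCol]; simp; omega

lemma pvCol_cons (c : Char) (t : List Char) (k : Nat) : ∀ i, pvCol (c :: t) (i + 1) k = pvCol t i k := by
  have key : ∀ m i, t.length - i ≤ m → pvCol (c :: t) (i + 1) k = pvCol t i k := by
    intro m
    induction m with
    | zero =>
      intro i h
      rw [pvCol_of_ge _ _ _ (by simp; omega), pvCol_of_ge _ _ _ (by omega)]
    | succ m ih =>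
      intro i h
      conv_lhs => rw [pvCol]
      conv_rhs => rw [pvCol]
      by_cases hi : i < t.length ∧ 0 < k
      · rw [dif_pos (⟨by simp; omega, hi.2⟩ : i + 1 < (c :: t).length ∧ 0 < k), dif_pos hi]
        have hhd : (c :: t)[i + 1]'(by simp; omega) = t[i]'hi.1 := by simp
        rw [hhd]
        congr 1
        have harg : i + 1 + k = (i + k) + 1 := by omega
        rw [harg]
        exact ih (i + k) (by omega)
      · rw [dif_neg (show ¬(i + 1 < (c :: t).length ∧ 0 < k) by simp; omega), dif_neg hi]
  intro i; exact key (t.length - i) i le_rfl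

lemma pvCol_append_left (a t : List Char) (k : Nat) : ∀ i, pvCol (a ++ t) (a.length + i) k = pvCol t i k := by
  induction a with
  | nil => simp
  | cons c a ih =>
    intro i
    have : (c :: a).length + i = (a.length + i) + 1 := by simp; omega
    rw [this, List.cons_append, pvCol_cons]
    exact ih i

-- column of a short list (length ≤ k): at most one element
lemma pvCol_short (l : List Char) (j k : Nat) (hk : 0 < k) (hl : l.length ≤ k) :
    pvCol l j k = (l[j]?).toList := by
  rw [pvCol]
  by_cases hj : j < l.length
  · rw [dif_pos ⟨hj, hk⟩, pvCol_of_ge _ _ _ (by omega)]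
    simp [List.getElem?_eq_getElem hj]
  · rw [dif_neg (by omega)]
    have hnone : l[j]? = none := List.getElem?_eq_none (by omega)
    rw [hnone]
    rfl

-- grid length and index are preserved by the fold
lemma pvFold_snd (k : Nat) (l : List Char) : ∀ g n, (l.foldl (pvStep k) (g, n)).2 = n + l.length := by
  induction l with
  | nil => simp
  | cons c t ih => intro g n; simp only [List.foldl_cons, pvStep]; rw [ih]; simp; omega

lemma pvFold_fst_length (k : Nat) (l : List Char) : ∀ g n, (l.foldl (pvStep k) (g, n)).1.length = g.length := by
  induction l with
  | nil => simp
  | cons c t ih => intro g n; simp only [List.foldl_cons, pvStep]; rw [ih]; simp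

-- the fold only depends on the index modulo k
lemma pvFold_shift (k : Nat) (l : List Char) : ∀ g n, (l.foldl (pvStep k) (g, n + k)).1 = (l.foldl (pvStep k) (g, n)).1 := by
  induction l with
  | nil => simp
  | cons c t ih =>
    intro g n
    simp only [List.foldl_cons, pvStep, Nat.add_mod_right]
    have : n + k + 1 = (n + 1) + k := by omega
    rw [this, ih]

-- one (possibly partial) row, starting at in-row index n
lemma pvFold_row (k : Nat) (row : List Char) : ∀ g n, g.length = k → n + row.length ≤ k →
    ∀ j, (row.foldl (pvStep k) (g, n)).1.getD j [] =
      g.getD j [] ++ (if n ≤ j then ((row[(j - n)]?).toList) else []) := by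
  induction row with
  | nil => intro g n hg hn j; simp
  | cons c rest ih =>
    intro g n hg hn j
    simp only [List.foldl_cons, pvStep]
    have hnk : n < k := by simp at hn; omega
    have hnmod : n % k = n := Nat.mod_eq_of_lt hnk
    rw [hnmod]
    rw [ih (g.modify n (· ++ [c])) (n + 1) (by simp [hg]) (by simp at hn ⊢; omega) j]
    rw [List.getD_eq_getElem?_getD, List.getElem?_modify]
    by_cases hj : n = j
    · subst hj
      have hlen : n < g.length := by omega
      rw [List.getElem?_eq_getElem hlen]
      rw [if_neg (show ¬ (n + 1 ≤ n) by omega), if_pos le_rfl]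
      rw [List.getD_eq_getElem?_getD, List.getElem?_eq_getElem hlen]
      simp
    · have hfmap : ((fun a => if n = j then a ++ [c] else a) <$> g[j]?) = g[j]? := by
        cases g[j]? <;> simp [hj]
      rw [hfmap, ← List.getD_eq_getElem?_getD]
      by_cases hle : n ≤ j
      · rw [if_pos (show n + 1 ≤ j by omega), if_pos hle]
        have h2 : j - n = (j - (n + 1)) + 1 := by omega
        rw [h2]
        simp
      · rw [if_neg (by omega), if_neg hle]
  
-- main invariant: the fold starting at index 0 produces exactly the stride-k columns
lemma pvFold_main (k : Nat) (hk : 0 < k) : ∀ l (g : List (List Char)), g.length = k →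
    ∀ j, j < k → (l.foldl (pvStep k) (g, 0)).1.getD j [] = g.getD j [] ++ pvCol l j k := by
  intro l
  induction hl : l.length using Nat.strong_induction_on generalizing l with
  | _ m ih =>
  intro g hg j hj
  by_cases hlen : l.length ≤ k
  · have hrow := pvFold_row k l g 0 hg (by omega) j
    simp only [Nat.zero_le, if_pos, Nat.sub_zero] at hrow
    rw [hrow, pvCol_short l j k hk hlen]
  · have hsplit : l = l.take k ++ l.drop k := (List.take_append_drop k l).symm
    have hrowlen : (l.take k).length = k := by simp; omega
    conv_lhs => rw [hsplit]
    rw [List.foldl_append]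
    have hsnd : (List.foldl (pvStep k) (g, 0) (l.take k)).2 = k := by
      rw [pvFold_snd]; omega
    have hpair : (List.foldl (pvStep k) (g, 0) (l.take k)) =
        ((List.foldl (pvStep k) (g, 0) (l.take k)).1, k) := Prod.ext rfl hsnd
    rw [hpair]
    set g' := (List.foldl (pvStep k) (g, 0) (l.take k)).1 with hg'
    have hshift : (List.foldl (pvStep k) (g', k) (l.drop k)).1 = (List.foldl (pvStep k) (g', 0) (l.drop k)).1 := by
      have := pvFold_shift k (l.drop k) g' 0
      simpa using this
    rw [hshift]
    have hglen : g'.length = k := by rw [hg', pvFold_fst_length, hg]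
    have hdlen : (l.drop k).length < m := by simp; omega
    rw [ih (l.drop k).length (by omega) (l.drop k) rfl g' hglen j hj]
    have hrow := pvFold_row k (l.take k) g 0 hg (by omega) j
    simp only [Nat.zero_le, if_pos, Nat.sub_zero] at hrow
    rw [← hg'] at hrow
    rw [hrow]
    have hjget : ((l.take k)[j]?).toList = [l[j]'(by omega)] := by
      have : (l.take k)[j]? = some (l[j]'(by omega)) := by
        rw [List.getElem?_take_of_lt (by omega), List.getElem?_eq_getElem (by omega)]
      rw [this]; rfl
    rw [hjget, List.append_assoc]
    congr 1
    -- pvCol l j k = l[j] :: pvCol (l.drop k) j k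
    conv_rhs => rw [pvCol]
    rw [dif_pos (⟨by omega, hk⟩ : j < l.length ∧ 0 < k)]
    rw [List.singleton_append]
    congr 1
    have : pvCol l (j + k) k = pvCol (l.take k ++ l.drop k) ((l.take k).length + j) k := by
      rw [← hsplit, hrowlen]; congr 1; omega
    rw [this, pvCol_append_left]

-- ===== VERDICT (by name: the statement is the Claim_ definition above) =====
theorem combined_keyless_keyed_transposition_cipher_spec : Claim_equal_combined_keyless_keyed_transposition_cipher := by
  intro text key _ _
  unfold Spec_combined_keyless_keyed_transposition_cipher
  unfold combined_keyless_keyed_transposition_cipher combined_keyless_keyed_transposition_cipher_alt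
  simp only []
  by_cases hbad : key.toList.isEmpty || PySem.Set.len (PySem.Set.ofList key.toList) ≠ key.toList.length
  · rw [if_pos hbad, if_pos hbad]
  · rw [if_neg hbad, if_neg hbad]
    have hk : 0 < key.toList.length := by
      cases h : key.toList with
      | nil => exfalso; rw [h] at hbad; simp at hbad
      | cons a l => simp
    rw [List.flatMap_def]
    congr 1
    congr 1
    apply List.map_congr_left
    intro i hi
    have hik : i < key.toList.length := by
      have := (PySem.List.mem_sorted _ _ _ _).mp hi
      simpa using this
    have hstep : (fun (st : List (List Char) × Nat) (c : Char) =>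
        (st.1.modify (st.2 % key.toList.length) (· ++ [c]), st.2 + 1)) = pvStep key.toList.length := rfl
    rw [hstep,
      pvFold_main key.toList.length hk _ (List.replicate key.toList.length []) (by simp) i hik]
    simp
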